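-- pv_equiv track=rewrite | github.com/wonprogrammer/programmers | 4_class/12230_2.py | solution
-- ===== SOURCE A (Python) =====
-- def solution(answers):
--     answer = []
--
--     a_cnt = 0
--     b_cnt = 0
--     c_cnt = 0
--
--     a = [1, 2, 3, 4, 5]
--     b = [2, 1, 2, 3, 2, 4, 2, 5]
--     c = [3, 3, 1, 1, 2, 2, 4, 4, 5, 5]
--
--     for i in range(len(answers)):
--         an = i % 5
--         bn = i % 8
--         cn = i % 10
--
--         if answers[i] == a[an]:
--             a_cnt += 1
--         if answers[i] == b[bn]:
--             b_cnt += 1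
--         if answers[i] == c[cn]:
--             c_cnt += 1
--
--     max_num = max(a_cnt, b_cnt, c_cnt)
--
--     if max_num == a_cnt:
--         answer.append(1)
--     if max_num == b_cnt:
--         answer.append(2)
--     if max_num == c_cnt:
--         answer.append(3)
--
--     return answer
-- ===== SOURCE B (Python) =====
-- def solution(answers):
--     # Histogram approach: one pass builds a frequency table keyed by
--     # (position mod 40, answer) -- 40 = lcm of the three pattern periods --
--     # then each pattern's score is read off the table via its 40-entry
--     # expected-answer column; no per-element pattern comparisons.
--     pats = [[1, 2, 3, 4, 5],
--             [2, 1, 2, 3, 2, 4, 2, 5],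
--             [3, 3, 1, 1, 2, 2, 4, 4, 5, 5]]
--     cols = [[p[r % len(p)] for r in range(40)] for p in pats]
--     freq = {}
--     for i, ans in enumerate(answers):
--         key = (i % 40, ans)
--         freq[key] = freq.get(key, 0) + 1
--     counts = [sum(freq.get((r, exp), 0) for r, exp in enumerate(col))
--               for col in cols]
--     best = max(counts)
--     return [k + 1 for k, c in enumerate(counts) if c == best]
-- ===== Notes on version B (the rewrite author's own statement) =====
-- stated objective: alternative
-- what changed: Replaces per-element comparison against the three cyclic patterns by a histogram: one pass builds a frequency dict keyed by (index mod 40, answer) (40 = lcm of the periods), and each score is then read off the dict through a precomputed 40-entry expected-answer column per pattern.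
import Mathlib
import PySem

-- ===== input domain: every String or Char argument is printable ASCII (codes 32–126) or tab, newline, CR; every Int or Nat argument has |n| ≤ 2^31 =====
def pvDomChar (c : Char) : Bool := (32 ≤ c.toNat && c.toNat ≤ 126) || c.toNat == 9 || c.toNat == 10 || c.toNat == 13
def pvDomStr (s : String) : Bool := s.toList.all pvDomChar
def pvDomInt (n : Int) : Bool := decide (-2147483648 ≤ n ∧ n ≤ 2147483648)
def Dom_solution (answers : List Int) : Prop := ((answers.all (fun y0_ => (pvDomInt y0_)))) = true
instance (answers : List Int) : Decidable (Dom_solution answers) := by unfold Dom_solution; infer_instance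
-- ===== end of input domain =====

-- B replaces A's per-element comparison against the three cyclic patterns by a histogram keyed by
-- (index mod 40, answer) plus 40-entry expected-answer columns; objective: alternative.

-- ===== PORT A =====
-- A's three pattern constants a, b, c
def patA : List Int := [1, 2, 3, 4, 5]
def patB : List Int := [2, 1, 2, 3, 2, 4, 2, 5]
def patC : List Int := [3, 3, 1, 1, 2, 2, 4, 4, 5, 5]

-- the body of A's `for i in range(len(answers))` loop; answers[i] and a[an]/b[bn]/c[cn] always
-- succeed (index in range), so comparing the two pyGet? options is exact
def stepA (answers : List Int) (s : Int × Int × Int) (i : Int) : Int × Int × Int :=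
  let an := PySem.Int.mod i 5
  let bn := PySem.Int.mod i 8
  let cn := PySem.Int.mod i 10
  let s := if PySem.List.pyGet? answers i = PySem.List.pyGet? patA an then (s.1 + 1, s.2.1, s.2.2) else s
  let s := if PySem.List.pyGet? answers i = PySem.List.pyGet? patB bn then (s.1, s.2.1 + 1, s.2.2) else s
  if PySem.List.pyGet? answers i = PySem.List.pyGet? patC cn then (s.1, s.2.1, s.2.2 + 1) else s

-- A's tail: max_num = max(a_cnt, b_cnt, c_cnt) and the three conditional appends
def tailA (a_cnt b_cnt c_cnt : Int) : List Int :=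
  let max_num := max (max a_cnt b_cnt) c_cnt
  let answer : List Int := if max_num = a_cnt then [(1 : Int)] else []
  let answer := if max_num = b_cnt then answer ++ [2] else answer
  if max_num = c_cnt then answer ++ [3] else answer

-- literal transliteration of A
def solution (answers : List Int) : List Int :=
  let st := (PySem.List.pyRange 0 (answers.length : Int)).foldl (stepA answers) (0, 0, 0)
  tailA st.1 st.2.1 st.2.2

-- ===== PORT B =====
-- B's expected-answer column for one pattern: [p[r % len(p)] for r in range(40)];
-- r % len(p) is always a valid index, so .getD 0 on pyGet? is exact
def colB (p : List Int) : List Int :=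
  (PySem.List.pyRange 0 40).map
    (fun r => (PySem.List.pyGet? p (PySem.Int.mod r (p.length : Int))).getD 0)

-- B's frequency dict: for i, ans in enumerate(answers): freq[(i % 40, ans)] = freq.get(.., 0) + 1
def freqB (answers : List Int) : PySem.Dict (Int × Int) Int :=
  (PySem.List.enumerate answers).foldl
    (fun d ia => d.insert (PySem.Int.mod ia.1 40, ia.2) (d.getD (PySem.Int.mod ia.1 40, ia.2) 0 + 1))
    PySem.Dict.empty

-- B's per-pattern score: sum(freq.get((r, exp), 0) for r, exp in enumerate(col))
def countB (freq : PySem.Dict (Int × Int) Int) (col : List Int) : Int :=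
  ((PySem.List.enumerate col).map (fun re => freq.getD re 0)).sum

-- B's tail: best = max(counts); [k + 1 for k, c in enumerate(counts) if c == best].
-- counts always has three entries, so max(counts) never raises and .getD 0 is exact.
def tailB (counts : List Int) : List Int :=
  let best := (PySem.List.max? counts (fun x => x)).getD 0
  (PySem.List.enumerate counts).foldl
    (fun acc ic => if ic.2 = best then acc ++ [ic.1 + 1] else acc) []

-- literal transliteration of B
def solution_alt (answers : List Int) : List Int :=
  let pats : List (List Int) :=
    [[1, 2, 3, 4, 5], [2, 1, 2, 3, 2, 4, 2, 5], [3, 3, 1, 1, 2, 2, 4, 4, 5, 5]]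
  let cols : List (List Int) := pats.map colB
  let freq := freqB answers
  let counts : List Int := cols.map (countB freq)
  tailB counts

-- ===== PRECONDITION & SPEC =====
def Spec_solution (answers : List Int) (out : List Int) : Prop := out = solution_alt answers
instance (answers : List Int) (out : List Int) : Decidable (Spec_solution answers out) := by unfold Spec_solution; infer_instance

-- ===== CLAIM (what is proved, stated in full; the proofs are below) =====
def Claim_equal_solution : Prop := ∀ (answers : List Int), Dom_solution answers → Spec_solution answers (solution answers)

-- ===== LEMMAS AND PROOFS =====

-- A's loop body, abstracted over the fetched element answers[i]
def stepG (s : Int × Int × Int) (i : Int) (o : Option Int) : Int × Int × Int :=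
  let s := if o = PySem.List.pyGet? patA (PySem.Int.mod i 5) then (s.1 + 1, s.2.1, s.2.2) else s
  let s := if o = PySem.List.pyGet? patB (PySem.Int.mod i 8) then (s.1, s.2.1 + 1, s.2.2) else s
  if o = PySem.List.pyGet? patC (PySem.Int.mod i 10) then (s.1, s.2.1, s.2.2 + 1) else s

-- number of (i, a) in l with a matching pattern p at position i
def cntOn (p : List Int) (l : List (Int × Int)) : Int :=
  ((l.filter (fun ia => PySem.List.pyGet? p (PySem.Int.mod ia.1 (p.length : Int)) == some ia.2)).map
    (fun _ => (1 : Int))).sum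

-- the (i % 40, a) key list B's dict counts
def klB (answers : List Int) : List (Int × Int) :=
  (PySem.List.enumerate answers).map (fun ia => (PySem.Int.mod ia.1 40, ia.2))

lemma enumerate_concat {α : Type} (xs : List α) (x : α) (s : Int) :
    PySem.List.enumerate (xs ++ [x]) s = PySem.List.enumerate xs s ++ [((s + xs.length : Int), x)] := by
  induction xs generalizing s with
  | nil => simp [PySem.List.enumerate]
  | cons y ys ih =>
      simp only [List.cons_append, PySem.List.enumerate, ih, List.length_cons]
      push_cast
      ring_nf

lemma pyGet?_append_left {α : Type} (xs : List α) (x : α) (i : Int)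
    (h0 : 0 ≤ i) (h1 : i < xs.length) :
    PySem.List.pyGet? (xs ++ [x]) i = PySem.List.pyGet? xs i := by
  have ht : i.toNat < xs.length := by omega
  simp only [PySem.List.pyGet?, PySem.List.pyIdx?, List.length_append, List.length_singleton]
  rw [if_pos h0, if_pos h0, if_pos (by push_cast; omega), if_pos (by exact_mod_cast h1)]
  simp [List.getElem?_append_left ht]

-- reading xs[i] for i in range(len(xs)) is scanning enumerate(xs)
lemma foldl_range_get {β : Type} (xs : List Int) (g : β → Int → Option Int → β) (init : β) :
    (PySem.List.pyRange 0 (xs.length : Int)).foldl (fun s i => g s i (PySem.List.pyGet? xs i)) init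
    = (PySem.List.enumerate xs).foldl (fun s ia => g s ia.1 (some ia.2)) init := by
  induction xs using List.reverseRecOn generalizing init with
  | nil => rfl
  | append_singleton ys x ih =>
      rw [show ((ys ++ [x]).length : Int) = (ys.length : Int) + 1 by simp,
          PySem.List.pyRange_one_succ_right (by positivity), List.foldl_append,
          enumerate_concat, List.foldl_append]
      rw [PySem.List.foldl_congr_mem (PySem.List.pyRange 0 (ys.length : Int)) _
            (fun s i => g s i (PySem.List.pyGet? ys i)) _ (by
          intro acc i hi
          rw [PySem.List.mem_pyRange_one] at hi
          rw [pyGet?_append_left ys x i hi.1 (by exact_mod_cast hi.2)])]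
      rw [ih]
      simp

lemma len_patA : ((patA.length : Nat) : Int) = 5 := rfl
lemma len_patB : ((patB.length : Nat) : Int) = 8 := rfl
lemma len_patC : ((patC.length : Nat) : Int) = 10 := rfl

-- the abstracted loop body accumulates the three per-pattern counts
lemma count_fold (l : List (Int × Int)) (s : Int × Int × Int) :
    l.foldl (fun s ia => stepG s ia.1 (some ia.2)) s
    = (s.1 + cntOn patA l, s.2.1 + cntOn patB l, s.2.2 + cntOn patC l) := by
  induction l generalizing s with
  | nil => simp [cntOn]
  | cons ia t ih =>
      rw [List.foldl_cons, ih]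
      simp only [cntOn, List.filter_cons, len_patA, len_patB, len_patC, beq_iff_eq]
      simp only [stepG, @eq_comm _ (some ia.2)]
      by_cases h1 : PySem.List.pyGet? patA (PySem.Int.mod ia.1 5) = some ia.2 <;>
      by_cases h2 : PySem.List.pyGet? patB (PySem.Int.mod ia.1 8) = some ia.2 <;>
      by_cases h3 : PySem.List.pyGet? patC (PySem.Int.mod ia.1 10) = some ia.2 <;>
        simp only [h1, h2, h3, if_true, if_false, List.map_cons, List.sum_cons] <;>
        simp [h1, h2, h3] <;> (try ring_nf) <;> (try simp)

-- B's dict is the counter of the key list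
lemma freqB_eq_counter (answers : List Int) :
    freqB answers = PySem.Dict.counter (klB answers) := by
  calc freqB answers
      = (klB answers).foldl (fun d k => d.insert k (d.getD k 0 + 1)) PySem.Dict.empty := by
        rw [klB, List.foldl_map]
        rfl
    _ = PySem.Dict.counter (klB answers) :=
        PySem.Dict.foldl_insert_getD_add_one_eq_counter _

-- reading xs[i] one past the head
lemma pyGet?_cons_pos (c : Int) (t : List Int) (i : Int) (h : 1 ≤ i) :
    PySem.List.pyGet? (c :: t) i = PySem.List.pyGet? t (i - 1) := by
  obtain ⟨n, hn⟩ : ∃ n : Nat, i = ((n + 1 : Nat) : Int) := ⟨i.toNat - 1, by omega⟩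
  subst hn
  rw [PySem.List.pyGet?_natCast, show ((((n + 1 : Nat)) : Int) - 1) = ((n : Nat) : Int) by omega,
      PySem.List.pyGet?_natCast]
  simp

-- taking mod twice, inner modulus a multiple of the outer
lemma mod_mod_dvd (n k L : Int) (hk : 0 < k) (hL : 0 < L) (hd : L ∣ k) :
    PySem.Int.mod (PySem.Int.mod n k) L = PySem.Int.mod n L := by
  rw [PySem.Int.mod_eq_emod_of_pos hk, PySem.Int.mod_eq_emod_of_pos hL,
      PySem.Int.mod_eq_emod_of_pos hL, Int.emod_emod_of_dvd n hd]

lemma cntOn_append (p : List Int) (l1 l2 : List (Int × Int)) :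
    cntOn p (l1 ++ l2) = cntOn p l1 + cntOn p l2 := by
  simp [cntOn, List.filter_append]

lemma cntOn_singleton (p : List Int) (n x : Int) :
    cntOn p [(n, x)]
      = if PySem.List.pyGet? p (PySem.Int.mod n (p.length : Int)) = some x then 1 else 0 := by
  simp only [cntOn, List.filter_cons, List.filter_nil, beq_iff_eq]
  split_ifs <;> simp

-- sum of an equality indicator over enumerate col reads off col at m
lemma ind_sum (col : List Int) : ∀ (s m x : Int),
    ((PySem.List.enumerate col s).map (fun re => if ((m, x) : Int × Int) = re then (1 : Int) else 0)).sum
    = if (s ≤ m ∧ m < s + col.length ∧ PySem.List.pyGet? col (m - s) = some x) then 1 else 0 := by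
  induction col with
  | nil =>
      intro s m x
      simp [PySem.List.enumerate]
      intros
      omega
  | cons c t ih =>
      intro s m x
      rw [PySem.List.enumerate_cons, List.map_cons, List.sum_cons, ih (s+1) m x]
      by_cases hm : m = s
      · subst hm
        have hz : PySem.List.pyGet? (c :: t) (m - m) = some c := by
          simp [PySem.List.pyGet?, PySem.List.pyIdx?]
        by_cases hx : x = c
        · subst hx
          rw [if_pos rfl, if_neg (by omega), if_pos ⟨le_refl _, by simp only [List.length_cons]; push_cast; omega, hz⟩]
          norm_num
        · rw [if_neg (fun hh => hx (congrArg Prod.snd hh)), if_neg (by omega), if_neg (by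
            rintro ⟨-, -, h⟩
            rw [hz] at h
            exact hx (Option.some.inj h).symm)]
          simp
      · rw [if_neg (by simp [hm])]
        by_cases hr : s + 1 ≤ m ∧ m < s + 1 + t.length ∧ PySem.List.pyGet? t (m - (s+1)) = some x
        · rw [if_pos hr, if_pos ⟨by omega, by simp only [List.length_cons]; push_cast; omega, by
            rw [pyGet?_cons_pos c t _ (by omega)]
            have h9 : m - s - 1 = m - (s + 1) := by ring
            rw [h9]; exact hr.2.2⟩]
          simp
        · rw [if_neg hr, if_neg (fun ⟨h1, h2, h3⟩ => hr ⟨by omega, by simp only [List.length_cons] at h2 ⊢; push_cast at h2 ⊢; omega, by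
            rw [pyGet?_cons_pos c t _ (by omega)] at h3
            have h9 : m - s - 1 = m - (s + 1) := by ring
            rwa [h9] at h3⟩)]
          simp

lemma count_sum_aux (p col : List Int) (hlen : col.length = 40)
    (hcol : ∀ m x : Int, 0 ≤ m → m < 40 →
      (PySem.List.pyGet? col m = some x ↔ PySem.List.pyGet? p (PySem.Int.mod m (p.length : Int)) = some x))
    (hdvd : (p.length : Int) ∣ 40) (hpos : 0 < (p.length : Int)) : ∀ (ys : List Int),
    ((PySem.List.enumerate col).map (fun re => ((klB ys).count re : Int))).sum
      = cntOn p (PySem.List.enumerate ys) := by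
  intro ys
  induction ys using List.reverseRecOn with
  | nil => simp [klB, cntOn, PySem.List.enumerate]
  | append_singleton ys x ih =>
      have hkl : klB (ys ++ [x]) = klB ys ++ [(PySem.Int.mod (ys.length : Int) 40, x)] := by
        rw [klB, enumerate_concat, List.map_append, zero_add]
        rfl
      have hmm : PySem.Int.mod (PySem.Int.mod (ys.length : Int) 40) (p.length : Int)
          = PySem.Int.mod (ys.length : Int) (p.length : Int) :=
        mod_mod_dvd _ _ _ (by norm_num) hpos hdvd
      have h1 : 0 ≤ PySem.Int.mod (ys.length : Int) 40 := PySem.Int.mod_nonneg _ (by norm_num)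
      have h2 : PySem.Int.mod (ys.length : Int) 40 < 40 := PySem.Int.mod_lt _ (by norm_num)
      have hsplit : ((PySem.List.enumerate col).map (fun re => ((klB (ys ++ [x])).count re : Int))).sum
          = ((PySem.List.enumerate col).map (fun re => ((klB ys).count re : Int))).sum
            + ((PySem.List.enumerate col).map
                (fun re => if ((PySem.Int.mod (ys.length : Int) 40, x) : Int × Int) = re then (1 : Int) else 0)).sum := by
        rw [← PySem.List.sum_map_add_int]
        refine congrArg List.sum (List.map_congr_left ?_)
        intro re _
        rw [hkl, List.count_append]
        rcases eq_or_ne ((PySem.Int.mod (ys.length : Int) 40, x) : Int × Int) re with h | h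
        · rw [if_pos h, h, List.count_singleton_self]
          push_cast
          ring
        · rw [if_neg h, List.count_eq_zero.mpr (fun hmem => h (List.mem_singleton.mp hmem).symm)]
          push_cast
          ring
      rw [hsplit, ih, ind_sum col 0 _ x]
      have hnew : (if (0 ≤ PySem.Int.mod (ys.length : Int) 40
            ∧ PySem.Int.mod (ys.length : Int) 40 < 0 + col.length
            ∧ PySem.List.pyGet? col (PySem.Int.mod (ys.length : Int) 40 - 0) = some x) then (1:Int) else 0)
          = if PySem.List.pyGet? p (PySem.Int.mod (ys.length : Int) (p.length : Int)) = some x then 1 else 0 := by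
        rw [hlen]
        have := hcol (PySem.Int.mod (ys.length : Int) 40) x h1 h2
        split_ifs with ha hb hb
        · rfl
        · exact absurd (hmm ▸ (this.mp (by simpa using ha.2.2))) hb
        · exact absurd ⟨h1, by simpa using h2, by simpa using this.mpr (hmm ▸ hb)⟩ ha
        · rfl
      rw [hnew, enumerate_concat, cntOn_append, zero_add, cntOn_singleton]

-- per-pattern: B's histogram read-off equals the direct match count
lemma main_count (p col : List Int) (hlen : col.length = 40)
    (hcol : ∀ m x : Int, 0 ≤ m → m < 40 →
      (PySem.List.pyGet? col m = some x ↔ PySem.List.pyGet? p (PySem.Int.mod m (p.length : Int)) = some x))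
    (hdvd : (p.length : Int) ∣ 40) (hpos : 0 < (p.length : Int)) (answers : List Int) :
    countB (freqB answers) col = cntOn p (PySem.List.enumerate answers) := by
  have h0 : countB (freqB answers) col
      = ((PySem.List.enumerate col).map (fun re => ((klB answers).count re : Int))).sum := by
    simp only [countB, freqB_eq_counter]
    refine congrArg List.sum (List.map_congr_left ?_)
    intro re _
    exact PySem.Dict.getD_counter _ re
  rw [h0, count_sum_aux p col hlen hcol hdvd hpos answers]

-- max(counts) on a three-element list is the nested binary max of A's tail
lemma max?_three (ca cb cc : Int) :
    PySem.List.max? [ca, cb, cc] (fun x => x) = some (max (max ca cb) cc) := by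
  simp only [PySem.List.max?, List.foldl_cons, List.foldl_nil, max_def]
  split_ifs <;> simp_all <;> (try split_ifs) <;> (try omega) <;> simp_all <;> omega

-- A's max/append tail equals B's argmax comprehension over the three counts
lemma tail_eq (ca cb cc : Int) : tailA ca cb cc = tailB [ca, cb, cc] := by
  have he : PySem.List.enumerate [ca, cb, cc] = [(0, ca), (1, cb), (2, cc)] := rfl
  simp only [tailA, tailB, max?_three, Option.getD_some, he, List.foldl_cons, List.foldl_nil]
  by_cases h1 : max (max ca cb) cc = ca <;>
  by_cases h2 : max (max ca cb) cc = cb <;>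
  by_cases h3 : max (max ca cb) cc = cc <;>
    simp [h1, h2, h3, eq_comm]

-- the three column hypotheses, on the literal columns
lemma colA_spec : ∀ m x : Int, 0 ≤ m → m < 40 →
    (PySem.List.pyGet? (colB patA) m = some x ↔ PySem.List.pyGet? patA (PySem.Int.mod m (patA.length : Int)) = some x) := by
  intro m x h1 h2
  interval_cases m <;>
    simp [colB, patA, PySem.List.pyGet?, PySem.List.pyIdx?, PySem.Int.mod, PySem.List.pyRange]

lemma colB_spec : ∀ m x : Int, 0 ≤ m → m < 40 →
    (PySem.List.pyGet? (colB patB) m = some x ↔ PySem.List.pyGet? patB (PySem.Int.mod m (patB.length : Int)) = some x) := by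
  intro m x h1 h2
  interval_cases m <;>
    simp [colB, patB, PySem.List.pyGet?, PySem.List.pyIdx?, PySem.Int.mod, PySem.List.pyRange]

lemma colC_spec : ∀ m x : Int, 0 ≤ m → m < 40 →
    (PySem.List.pyGet? (colB patC) m = some x ↔ PySem.List.pyGet? patC (PySem.Int.mod m (patC.length : Int)) = some x) := by
  intro m x h1 h2
  interval_cases m <;>
    simp [colB, patC, PySem.List.pyGet?, PySem.List.pyIdx?, PySem.Int.mod, PySem.List.pyRange]

-- ===== VERDICT (by name: the statement is the Claim_ definition above) =====
theorem solution_spec : Claim_equal_solution := by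
  intro answers _
  unfold Spec_solution solution solution_alt
  have hstep : stepA answers = fun s i => stepG s i (PySem.List.pyGet? answers i) := rfl
  rw [hstep, foldl_range_get, count_fold]
  have hA : countB (freqB answers) (colB patA) = cntOn patA (PySem.List.enumerate answers) :=
    main_count patA (colB patA) (by decide) colA_spec ⟨8, by decide⟩ (by decide) answers
  have hB : countB (freqB answers) (colB patB) = cntOn patB (PySem.List.enumerate answers) :=
    main_count patB (colB patB) (by decide) colB_spec ⟨5, by decide⟩ (by decide) answers
  have hC : countB (freqB answers) (colB patC) = cntOn patC (PySem.List.enumerate answers) :=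
    main_count patC (colB patC) (by decide) colC_spec ⟨4, by decide⟩ (by decide) answers
  have hpats : [[1, 2, 3, 4, 5], [2, 1, 2, 3, 2, 4, 2, 5], [3, 3, 1, 1, 2, 2, 4, 4, 5, 5]].map colB
      = [colB patA, colB patB, colB patC] := rfl
  simp only [hpats, List.map_cons, List.map_nil, hA, hB, hC, zero_add]
  exact tail_eq _ _ _
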